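-- pv_equiv track=rewrite | github.com/rayvega/utility-scripts | fileMgt/editFileContent.py | update_text
-- ===== SOURCE A (Python) =====
-- def update_text(original_text, text_changes):
--     new_lines = []
--
--     for count, line in enumerate(original_text.splitlines()):
--         current_line_number = count + 1
--
--         if current_line_number in text_changes:
--             text_to_insert_lines = text_changes[current_line_number].splitlines()
--             new_lines.extend(text_to_insert_lines)
--
--         new_lines.append(line)
--
--     new_text = "\n".join(new_lines)
--
--     return new_text
-- ===== SOURCE B (Python) =====
-- def update_text(original_text, text_changes):
--     lines = original_text.splitlines()
--     n = len(lines)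
--     for k in sorted(text_changes, reverse=True):
--         if 1 <= k <= n:
--             lines[k - 1:k - 1] = text_changes[k].splitlines()
--     return "\n".join(lines)
-- ===== Notes on version B (the rewrite author's own statement) =====
-- stated objective: alternative
-- what changed: Instead of scanning every line and testing its 1-based number for dict membership, B sorts the change keys descending and splices each entry's lines into a positional line list via slice assignment, then joins once.
import Mathlib
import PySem

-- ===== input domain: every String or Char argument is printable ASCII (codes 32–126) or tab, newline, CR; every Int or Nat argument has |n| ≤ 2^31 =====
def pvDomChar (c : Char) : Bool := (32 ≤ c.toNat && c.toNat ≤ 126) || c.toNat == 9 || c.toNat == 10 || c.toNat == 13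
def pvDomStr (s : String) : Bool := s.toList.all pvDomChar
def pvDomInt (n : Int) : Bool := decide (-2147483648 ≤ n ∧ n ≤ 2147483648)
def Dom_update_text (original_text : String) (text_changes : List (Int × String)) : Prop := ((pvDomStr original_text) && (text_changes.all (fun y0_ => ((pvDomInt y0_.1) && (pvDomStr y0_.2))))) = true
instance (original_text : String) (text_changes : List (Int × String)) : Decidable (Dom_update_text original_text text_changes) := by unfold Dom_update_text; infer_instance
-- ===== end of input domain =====

-- B replaces A's per-line scan (membership test before every line) by sorting the change keys
-- descending and splicing each insertion into a positional line list (objective: alternative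
-- decomposition, same cost).

-- ===== PORT A =====
-- A: walk enumerate(splitlines) once; before each line whose 1-based number is a dict key,
-- extend with that entry's splitlines; join with "\n".
def update_text (original_text : String) (text_changes : List (Int × String)) : String :=
  let d := PySem.Dict.ofList text_changes
  let new_lines :=
    (PySem.List.enumerate (PySem.Str.splitlines original_text)).foldl
      (fun acc cl =>
        let current_line_number : Int := cl.1 + 1
        let acc :=
          if d.contains current_line_number then
            acc ++ PySem.Str.splitlines (d.getD current_line_number "")
          else acc
        acc ++ [cl.2]) []
  PySem.Str.join "\n" new_lines

-- ===== PORT B =====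
-- B: sort the keys descending; for each key k in range 1..n splice that entry's splitlines at
-- index k-1 (the slice assignment lines[k-1:k-1] = …); join with "\n".
def update_text_alt (original_text : String) (text_changes : List (Int × String)) : String :=
  let d := PySem.Dict.ofList text_changes
  let lines := PySem.Str.splitlines original_text
  let n : Int := lines.length
  let final :=
    (PySem.List.sorted d.keys (fun k => k) true).foldl
      (fun ls k =>
        if 1 ≤ k ∧ k ≤ n then
          ls.take (k - 1).toNat ++ PySem.Str.splitlines (d.getD k "") ++ ls.drop (k - 1).toNat
        else ls) lines
  PySem.Str.join "\n" final

-- ===== PRECONDITION & SPEC =====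
def Spec_update_text (original_text : String) (text_changes : List (Int × String)) (out : String) : Prop := out = update_text_alt original_text text_changes
instance (original_text : String) (text_changes : List (Int × String)) (out : String) : Decidable (Spec_update_text original_text text_changes out) := by unfold Spec_update_text; infer_instance

-- ===== CLAIM (what is proved, stated in full; the proofs are below) =====
def Claim_equal_update_text : Prop := ∀ (original_text : String) (text_changes : List (Int × String)), Dom_update_text original_text text_changes → Spec_update_text original_text text_changes (update_text original_text text_changes)

-- ===== LEMMAS AND PROOFS =====

-- the splice step of B, abstracted over the inserted block g k
def pvSplice (g : Int → List String) (ls : List String) (k : Int) : List String :=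
  ls.take (k - 1).toNat ++ g k ++ ls.drop (k - 1).toNat

-- splicing only at positions inside a prefix leaves the suffix untouched
theorem pvFoldSplice_append (g : Int → List String) (ks : List Int) :
    ∀ (A B : List String), (∀ k ∈ ks, (k - 1).toNat ≤ A.length) →
    ks.foldl (pvSplice g) (A ++ B) = ks.foldl (pvSplice g) A ++ B := by
  induction ks with
  | nil => intro A B _; rfl
  | cons k ks ih =>
    intro A B h
    have hk : (k - 1).toNat ≤ A.length := h k (by simp)
    have hstep : pvSplice g (A ++ B) k = pvSplice g A k ++ B := by
      unfold pvSplice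
      rw [List.take_append_of_le_length hk, List.drop_append_of_le_length hk]
      simp
    simp only [List.foldl_cons, hstep]
    exact ih _ _ (fun k' hk' => le_trans (h k' (by simp [hk'])) (by simp [pvSplice]; omega))

-- a weave whose condition never fires beyond s is the identity
theorem pvFlat_of_none (f : Int → List String) (t : List String) :
    ∀ s : Int, (∀ i : Int, s < i → f i = []) →
    (PySem.List.enumerate t s).flatMap (fun cl => f (cl.1 + 1) ++ [cl.2]) = t := by
  induction t with
  | nil => intro s _; simp [PySem.List.enumerate_nil]
  | cons x t ih =>
    intro s h
    rw [PySem.List.enumerate_cons]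
    simp only [List.flatMap_cons, h (s + 1) (by omega)]
    simp [ih (s + 1) (fun i hi => h i (by omega))]

-- descending in-range splices compute the per-line weave
theorem pvFoldSplice_eq_flatMap (g : Int → List String) (ks : List Int)
    (hsort : ks.Pairwise (fun a b => b < a)) :
    ∀ lines : List String, (∀ k ∈ ks, 1 ≤ k ∧ k ≤ (lines.length : Int)) →
    ks.foldl (pvSplice g) lines =
      (PySem.List.enumerate lines).flatMap
        (fun cl => (if cl.1 + 1 ∈ ks then g (cl.1 + 1) else []) ++ [cl.2]) := by
  induction ks with
  | nil =>
    intro lines _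
    simpa using (pvFlat_of_none (fun _ => []) lines 0 (fun _ _ => rfl)).symm
  | cons k ks ih =>
    intro lines hrange
    obtain ⟨hk1, hkn⟩ := hrange k (by simp)
    have hlt : ∀ k' ∈ ks, k' < k := fun k' h' => (List.pairwise_cons.mp hsort).1 k' h'
    set p : Nat := (k - 1).toNat with hp
    have hpk : (p : Int) = k - 1 := by omega
    have hplen : p < lines.length := by omega
    simp only [List.foldl_cons]
    have htake : (lines.take p).length = p := by simp; omega
    have hsplit : pvSplice g lines k = lines.take p ++ (g k ++ lines.drop p) := by
      simp [pvSplice, ← hp]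
    rw [hsplit, pvFoldSplice_append g ks _ _ (by
      intro k' h'
      have h1 := (hrange k' (by simp [h'])).1
      have h2 := hlt k' h'
      rw [htake]; omega)]
    rw [ih (List.pairwise_cons.mp hsort).2 (lines.take p) (by
      intro k' h'
      refine ⟨(hrange k' (by simp [h'])).1, ?_⟩
      have h2 := hlt k' h'
      have h1 := (hrange k' (by simp [h'])).1
      rw [htake]; omega)]
    obtain ⟨x, t, hxt⟩ : ∃ x t, lines.drop p = x :: t := by
      cases hdrop : lines.drop p with
      | nil =>
        exfalso
        have hlen : (lines.drop p).length = lines.length - p := by simp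
        rw [hdrop] at hlen; simp at hlen; omega
      | cons x t => exact ⟨x, t, rfl⟩
    have hdroppart : (PySem.List.enumerate (lines.drop p) ((0 : Int) + (p : Int))).flatMap
        (fun cl => (if cl.1 + 1 ∈ k :: ks then g (cl.1 + 1) else []) ++ [cl.2]) =
        g k ++ lines.drop p := by
      rw [hxt, PySem.List.enumerate_cons, List.flatMap_cons]
      have hmem : ((0 : Int) + (p : Int)) + 1 ∈ k :: ks := by
        simp only [List.mem_cons]; left; omega
      rw [if_pos hmem]
      have htail : (PySem.List.enumerate t (((0 : Int) + (p : Int)) + 1)).flatMap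
          (fun cl => (if cl.1 + 1 ∈ k :: ks then g (cl.1 + 1) else []) ++ [cl.2]) = t :=
        pvFlat_of_none (fun i => if i ∈ k :: ks then g i else []) t _ (fun i hi => by
          have hnm : i ∉ k :: ks := by
            simp only [List.mem_cons, not_or]
            exact ⟨by omega, fun hc => by have := hlt _ hc; omega⟩
          simp [hnm])
      rw [htail]
      have hkeq : ((0 : Int) + (p : Int)) + 1 = k := by omega
      rw [hkeq]
      simp
    have hcong : (PySem.List.enumerate (lines.take p)).flatMap
        (fun cl => (if cl.1 + 1 ∈ k :: ks then g (cl.1 + 1) else []) ++ [cl.2]) =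
        (PySem.List.enumerate (lines.take p)).flatMap
        (fun cl => (if cl.1 + 1 ∈ ks then g (cl.1 + 1) else []) ++ [cl.2]) := by
      apply List.flatMap_congr
      intro cl hcl
      obtain ⟨j, hj, rfl⟩ := (PySem.List.mem_enumerate_iff _ _ _).mp hcl
      have hjp : j < p := by rw [htake] at hj; exact hj
      have hne : (j : Int) + 1 ≠ k := by omega
      simp [List.mem_cons, hne]
    conv_rhs => rw [show lines = lines.take p ++ lines.drop p by simp]
    rw [PySem.List.enumerate_append, List.flatMap_append, htake, hdroppart, hcong]

theorem update_text_spec : Claim_equal_update_text := by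
  intro original_text text_changes _
  unfold Spec_update_text
  simp only [update_text, update_text_alt]
  apply congrArg
  set d := PySem.Dict.ofList text_changes with hd
  set lines := PySem.Str.splitlines original_text with hl
  set n : Int := (lines.length : Int) with hn
  set g : Int → List String := fun k => PySem.Str.splitlines (d.getD k "") with hg
  -- A's loop body as an extend, then as a flatMap
  have hbody : (fun (acc : List String) (cl : Int × String) =>
      (if d.contains (cl.1 + 1) then acc ++ g (cl.1 + 1) else acc) ++ [cl.2]) =
      (fun acc cl => acc ++ ((if d.contains (cl.1 + 1) then g (cl.1 + 1) else []) ++ [cl.2])) := by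
    funext acc cl; split_ifs <;> simp
  rw [hbody, PySem.List.foldl_append_eq_flatMap]
  -- B's loop with inline guard as a fold of splices over the filtered key list
  set ks : List Int := (PySem.List.sorted d.keys (fun k => k) true).filter
      (fun k => decide (1 ≤ k ∧ k ≤ n)) with hks
  have hB : (PySem.List.sorted d.keys (fun k => k) true).foldl
      (fun ls k => if 1 ≤ k ∧ k ≤ n then ls.take (k - 1).toNat ++ g k ++ ls.drop (k - 1).toNat else ls) lines =
      ks.foldl (pvSplice g) lines := by
    rw [hks, List.foldl_filter]
    simp [pvSplice]
  rw [hB]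
  -- ks is strictly descending and in range
  have hnodup : ks.Nodup := by
    apply List.Nodup.filter
    exact ((PySem.List.sorted_perm d.keys (fun k => k) true).nodup_iff).mpr
      (PySem.Dict.nodup_keys_ofList text_changes)
  have hdesc : ks.Pairwise (fun a b => b ≤ a) := by
    apply List.Pairwise.filter
    exact PySem.List.sorted_pairwise_rev d.keys (fun k => k)
  have hsort : ks.Pairwise (fun a b => b < a) := by
    have := hdesc.and hnodup
    exact this.imp (fun h => lt_of_le_of_ne h.1 (fun he => h.2 he.symm))
  have hrange : ∀ k ∈ ks, 1 ≤ k ∧ k ≤ n := by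
    intro k hk
    have := (List.mem_filter.mp hk).2
    simpa using this
  rw [pvFoldSplice_eq_flatMap g ks hsort lines hrange]
  -- pointwise: membership in ks is exactly d.contains for 1-based indices of lines
  apply List.flatMap_congr
  intro cl hcl
  obtain ⟨j, hj, rfl⟩ := (PySem.List.mem_enumerate_iff _ _ _).mp hcl
  have hmem : ((j : Int) + 1) ∈ ks ↔ d.contains ((j : Int) + 1) = true := by
    rw [hks, List.mem_filter]
    simp only [PySem.List.mem_sorted, decide_eq_true_eq]
    constructor
    · intro h; exact (PySem.Dict.contains_iff_mem_keys d _).mpr h.1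
    · intro h
      exact ⟨(PySem.Dict.contains_iff_mem_keys d _).mp h, by omega, by omega⟩
  by_cases hc : d.contains ((j : Int) + 1) = true
  · simp [hc, hmem.mpr hc]
  · have hnm : ((j : Int) + 1) ∉ ks := fun h => hc (hmem.mp h)
    simp [hnm, hc]
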